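-- pv_equiv track=rewrite | github.com/patrykso/numerical-methods-projects | linear-equations/src/main.py | matrix_fill
-- ===== SOURCE A (Python) =====
-- def matrix_fill(matrix, a1):
--     for i in range(len(matrix)):
--         for j in range(len(matrix)):
--             if i == j:
--                 matrix[i][j] = a1
--             elif i == j + 1 or i == j - 1 or i == j + 2 or i == j - 2:
--                 matrix[i][j] = -1
--     return matrix
-- ===== SOURCE B (Python) =====
-- def matrix_fill(matrix, a1):
--     n = len(matrix)
--     for i, row in enumerate(matrix):
--         row[i] = a1
--         for j in (i - 2, i - 1, i + 1, i + 2):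
--             if 0 <= j < n:
--                 row[j] = -1
--     return matrix
-- ===== Notes on version B (the rewrite author's own statement) =====
-- stated objective: faster
-- what changed: Instead of scanning all N*N (i,j) cells and testing the band condition for each, B visits each row once and writes only the at most five band cells (i and the in-range i±1, i±2) directly.
import Mathlib
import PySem

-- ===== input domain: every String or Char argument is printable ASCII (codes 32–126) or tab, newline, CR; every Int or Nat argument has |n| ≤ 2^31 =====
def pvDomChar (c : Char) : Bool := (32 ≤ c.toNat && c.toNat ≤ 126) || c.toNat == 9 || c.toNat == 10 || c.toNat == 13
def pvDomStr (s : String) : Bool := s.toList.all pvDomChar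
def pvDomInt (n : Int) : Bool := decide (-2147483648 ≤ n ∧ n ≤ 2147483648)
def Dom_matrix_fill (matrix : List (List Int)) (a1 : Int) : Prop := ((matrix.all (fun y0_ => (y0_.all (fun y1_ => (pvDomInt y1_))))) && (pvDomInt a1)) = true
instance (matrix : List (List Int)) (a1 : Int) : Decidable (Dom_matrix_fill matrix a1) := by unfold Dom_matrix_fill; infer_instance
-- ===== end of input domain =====

-- B writes only the ≤ 5 band cells of each row instead of scanning all N×N cells: O(N) vs O(N^2).
-- Python A and B both mutate `matrix` in place and return it; the equivalence proved here is about the return value.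

-- ===== PORT A =====
-- literal transliteration of A's nested loops; matrix[i][j] = v ported as List.set
-- (in-range exactly on Pre_; Python raises IndexError outside it, which Pre_ excludes)
def matrix_fill (matrix : List (List Int)) (a1 : Int) : List (List Int) :=
  (List.range matrix.length).foldl (fun (m : List (List Int)) (i : Nat) =>
    (List.range matrix.length).foldl (fun (m : List (List Int)) (j : Nat) =>
      if (i : Int) = (j : Int) then
        m.set i ((m.getD i []).set j a1)
      else if (i : Int) = (j : Int) + 1 ∨ (i : Int) = (j : Int) - 1 ∨ (i : Int) = (j : Int) + 2 ∨ (i : Int) = (j : Int) - 2 then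
        m.set i ((m.getD i []).set j (-1))
      else m) m) matrix

-- ===== PORT B =====
-- transliteration of Source B: one pass over enumerate(matrix); per row set the diagonal and the
-- in-range offsets i±1, i±2 only
def matrix_fill_alt (matrix : List (List Int)) (a1 : Int) : List (List Int) :=
  let n := matrix.length
  matrix.zipIdx.map (fun p =>
    [(p.2 : Int) - 2, (p.2 : Int) - 1, (p.2 : Int) + 1, (p.2 : Int) + 2].foldl
      (fun r j => if 0 ≤ j ∧ j < (n : Int) then r.set j.toNat (-1) else r)
      (p.1.set p.2 a1))

-- ===== PRECONDITION & SPEC =====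
-- Pre_ excludes exactly the inputs on which Python A raises IndexError: a row i shorter than
-- min(i+2, N-1)+1, the largest column the band write touches in that row.
def Pre_matrix_fill (matrix : List (List Int)) (a1 : Int) : Prop :=
  ∀ p ∈ matrix.zipIdx, min (p.2 + 2) (matrix.length - 1) < p.1.length
instance (matrix : List (List Int)) (a1 : Int) : Decidable (Pre_matrix_fill matrix a1) := by unfold Pre_matrix_fill; infer_instance
def pvWitness_matrix_fill : List (List Int) × Int := ([[0,0,0],[0,0,0],[0,0,0]], 5)

def Spec_matrix_fill (matrix : List (List Int)) (a1 : Int) (out : List (List Int)) : Prop := out = matrix_fill_alt matrix a1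
instance (matrix : List (List Int)) (a1 : Int) (out : List (List Int)) : Decidable (Spec_matrix_fill matrix a1 out) := by unfold Spec_matrix_fill; infer_instance

-- ===== CLAIM (what is proved, stated in full; the proofs are below) =====
def Claim_equal_matrix_fill : Prop := ∀ (matrix : List (List Int)) (a1 : Int), Dom_matrix_fill matrix a1 → Pre_matrix_fill matrix a1 → Spec_matrix_fill matrix a1 (matrix_fill matrix a1)

-- ===== LEMMAS AND PROOFS =====

-- getElem?-level description of a single set, valid also out of range
theorem pv_set_get? {α : Type} (l : List α) (i k : Nat) (v : α) :
    (l.set i v)[k]? = if i = k then (l[k]?).map (fun _ => v) else l[k]? := by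
  rw [List.getElem?_set]
  by_cases h : i = k
  · subst h
    by_cases hl : i < l.length
    · simp [hl]
    · simp [hl]
  · simp [h]

-- A's inner loop body, as its own function (definitionally the lambda in matrix_fill)
def stepA (a1 : Int) (i : Nat) (m : List (List Int)) (j : Nat) : List (List Int) :=
  if (i : Int) = (j : Int) then
    m.set i ((m.getD i []).set j a1)
  else if (i : Int) = (j : Int) + 1 ∨ (i : Int) = (j : Int) - 1 ∨ (i : Int) = (j : Int) + 2 ∨ (i : Int) = (j : Int) - 2 then
    m.set i ((m.getD i []).set j (-1))
  else m

-- the same loop acting on a single row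
def rowA (n : Nat) (a1 : Int) (i : Nat) (r : List Int) : List Int :=
  (List.range n).foldl (fun (r : List Int) (j : Nat) =>
    if (i : Int) = (j : Int) then r.set j a1
    else if (i : Int) = (j : Int) + 1 ∨ (i : Int) = (j : Int) - 1 ∨ (i : Int) = (j : Int) + 2 ∨ (i : Int) = (j : Int) - 2 then r.set j (-1)
    else r) r

-- the common pointwise description of one filled row
def rowSpec (n : Nat) (a1 : Int) (i : Nat) (r : List Int) (k : Nat) : Option Int :=
  if k < n ∧ ((i : Int) = (k : Int) ∨ (i : Int) = (k : Int) + 1 ∨ (i : Int) = (k : Int) - 1 ∨ (i : Int) = (k : Int) + 2 ∨ (i : Int) = (k : Int) - 2) then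
    (r[k]?).map (fun _ => if i = k then a1 else -1)
  else r[k]?

theorem rowA_get (n : Nat) (a1 : Int) (i : Nat) (r : List Int) (k : Nat) :
    (rowA n a1 i r)[k]? = rowSpec n a1 i r k := by
  induction n with
  | zero => simp [rowA, rowSpec]
  | succ n ih =>
    rw [rowA, List.range_succ, List.foldl_append, List.foldl_cons, List.foldl_nil]
    show (if (i : Int) = (n : Int) then (rowA n a1 i r).set n a1
          else if (i : Int) = (n : Int) + 1 ∨ (i : Int) = (n : Int) - 1 ∨ (i : Int) = (n : Int) + 2 ∨ (i : Int) = (n : Int) - 2 then (rowA n a1 i r).set n (-1)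
          else rowA n a1 i r)[k]? = _
    cases hr : r[k]? with
    | none =>
      have hn : (rowA n a1 i r)[k]? = none := by rw [ih]; simp [rowSpec, hr]
      split_ifs <;> simp [pv_set_get?, hn, rowSpec, hr]
    | some x =>
      split_ifs with h1 h2 <;>
        simp only [pv_set_get?, ih, rowSpec, hr, Option.map_some] <;>
        split_ifs <;> first | rfl | omega

theorem set_getD_self (m : List (List Int)) (i : Nat) : m.set i (m.getD i []) = m := by
  apply List.ext_getElem?
  intro k
  rw [pv_set_get?]
  by_cases h : i = k
  · subst h
    simp [List.getD_eq_getElem?_getD]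
    cases hm : m[i]? <;> simp
  · simp [h]

-- inner loop over j touches only row i
theorem inner_eq_row (n : Nat) (a1 : Int) (i : Nat) (m : List (List Int)) :
    (List.range n).foldl (stepA a1 i) m = m.set i (rowA n a1 i (m.getD i [])) := by
  by_cases him : i < m.length
  · induction n with
    | zero => exact (set_getD_self m i).symm
    | succ n ih =>
      rw [List.range_succ, List.foldl_append, List.foldl_cons, List.foldl_nil, ih]
      have hget : (m.set i (rowA n a1 i (m.getD i []))).getD i [] = rowA n a1 i (m.getD i []) := by
        simp [List.getD_eq_getElem?_getD, him]
      conv_rhs => rw [rowA, List.range_succ, List.foldl_append, List.foldl_cons, List.foldl_nil]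
      show stepA a1 i _ n = _
      unfold stepA
      rw [hget]
      split_ifs <;> simp [List.set_set, rowA]
  · have hset : ∀ x : List Int, m.set i x = m := fun x => List.set_eq_of_length_le (by omega)
    have hfold : ∀ N, (List.range N).foldl (stepA a1 i) m = m := by
      intro N
      induction N with
      | zero => rfl
      | succ N ihN =>
        rw [List.range_succ, List.foldl_append, List.foldl_cons, List.foldl_nil, ihN]
        unfold stepA
        split_ifs <;> simp [hset]
    rw [hfold, hset]

-- pointwise description of the outer loop
theorem outer_get (n : Nat) (a1 : Int) (N : Nat) (m : List (List Int)) (k : Nat) :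
    ((List.range N).foldl (fun m i => m.set i (rowA n a1 i (m.getD i []))) m)[k]? =
      if k < N then (m[k]?).map (rowA n a1 k) else m[k]? := by
  induction N generalizing k with
  | zero => simp
  | succ N ih =>
    rw [List.range_succ, List.foldl_append, List.foldl_cons, List.foldl_nil]
    set M := (List.range N).foldl (fun m i => m.set i (rowA n a1 i (m.getD i []))) m with hM
    rw [pv_set_get?]
    by_cases hk : N = k
    · subst hk
      have hMN : M[N]? = m[N]? := by rw [ih]; simp
      have hg : M.getD N [] = (m[N]?).getD [] := by
        rw [List.getD_eq_getElem?_getD, hMN]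
      rw [if_pos rfl, if_pos (Nat.lt_succ_self N), hMN, hg]
      cases hm : m[N]? <;> simp
    · rw [if_neg hk, ih]
      by_cases h2 : k < N
      · rw [if_pos h2, if_pos (by omega)]
      · rw [if_neg h2, if_neg (by omega)]

theorem matrix_fill_get (matrix : List (List Int)) (a1 : Int) (k : Nat) :
    (matrix_fill matrix a1)[k]? = (matrix[k]?).map (rowA matrix.length a1 k) := by
  have h : matrix_fill matrix a1 =
      (List.range matrix.length).foldl
        (fun m i => m.set i (rowA matrix.length a1 i (m.getD i []))) matrix := by
    unfold matrix_fill
    show (List.range matrix.length).foldl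
        (fun (m : List (List Int)) (i : Nat) => (List.range matrix.length).foldl (stepA a1 i) m) matrix = _
    have hfun : (fun (m : List (List Int)) (i : Nat) => (List.range matrix.length).foldl (stepA a1 i) m)
        = fun (m : List (List Int)) (i : Nat) => m.set i (rowA matrix.length a1 i (m.getD i [])) :=
      funext fun m => funext fun i => inner_eq_row matrix.length a1 i m
    rw [hfun]
  rw [h, outer_get]
  by_cases hk : k < matrix.length
  · rw [if_pos hk]
  · rw [if_neg hk, List.getElem?_eq_none (by omega : matrix.length ≤ k)]
    rfl

-- B's per-row computation
def rowB (n : Nat) (a1 : Int) (i : Nat) (r : List Int) : List Int :=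
  [(i : Int) - 2, (i : Int) - 1, (i : Int) + 1, (i : Int) + 2].foldl
    (fun r j => if 0 ≤ j ∧ j < (n : Int) then r.set j.toNat (-1) else r)
    (r.set i a1)

-- folding the guarded writes of -1 over a list of candidate column indices
theorem fold_neg1_get (n : Nat) (js : List Int) (r : List Int) (k : Nat) :
    (js.foldl (fun (r : List Int) (j : Int) => if 0 ≤ j ∧ j < (n : Int) then r.set j.toNat (-1) else r) r)[k]? =
      if ∃ j ∈ js, 0 ≤ j ∧ j < (n : Int) ∧ j.toNat = k then (r[k]?).map (fun _ => (-1 : Int)) else r[k]? := by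
  induction js generalizing r with
  | nil => simp
  | cons j js ih =>
    rw [List.foldl_cons, ih]
    by_cases hj : (0 ≤ j ∧ j < (n : Int)) ∧ j.toNat = k
    · rw [if_pos hj.1, pv_set_get?, if_pos hj.2]
      by_cases hex : ∃ j' ∈ js, 0 ≤ j' ∧ j' < (n : Int) ∧ j'.toNat = k
      · rw [if_pos hex, if_pos ⟨j, List.mem_cons_self, hj.1.1, hj.1.2, hj.2⟩, Option.map_map]
        cases r[k]? <;> rfl
      · rw [if_neg hex, if_pos ⟨j, List.mem_cons_self, hj.1.1, hj.1.2, hj.2⟩]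
    · have hr : (if 0 ≤ j ∧ j < (n : Int) then r.set j.toNat (-1) else r)[k]? = r[k]? := by
        split_ifs with hg
        · rw [pv_set_get?, if_neg (fun h => hj ⟨hg, h⟩)]
        · rfl
      rw [hr]
      by_cases hex : ∃ j' ∈ js, 0 ≤ j' ∧ j' < (n : Int) ∧ j'.toNat = k
      · rw [if_pos hex, if_pos (by rcases hex with ⟨j', hm, h⟩; exact ⟨j', List.mem_cons_of_mem _ hm, h⟩)]
      · rw [if_neg hex, if_neg (by rintro ⟨j', hm, h⟩; rcases List.mem_cons.mp hm with rfl | hm'; exacts [hj ⟨⟨h.1, h.2.1⟩, h.2.2⟩, hex ⟨j', hm', h⟩])]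

theorem rowB_get (n : Nat) (a1 : Int) (i : Nat) (hi : i < n) (r : List Int) (k : Nat) :
    (rowB n a1 i r)[k]? = rowSpec n a1 i r k := by
  rw [rowB, fold_neg1_get, pv_set_get?, rowSpec]
  by_cases hik : i = k
  · subst hik
    rw [if_neg (by simp; omega), if_pos rfl, if_pos ⟨hi, Or.inl rfl⟩, if_pos rfl]
  · rw [if_neg hik]
    by_cases hex : ∃ j ∈ [(i : Int) - 2, (i : Int) - 1, (i : Int) + 1, (i : Int) + 2], 0 ≤ j ∧ j < (n : Int) ∧ j.toNat = k
    · rw [if_pos hex, if_pos (by simp at hex; omega), if_neg hik]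
    · rw [if_neg hex, if_neg (by simp at hex; omega)]

theorem row_eq (n : Nat) (a1 : Int) (i : Nat) (hi : i < n) (r : List Int) :
    rowA n a1 i r = rowB n a1 i r := by
  apply List.ext_getElem?
  intro k
  rw [rowA_get, rowB_get n a1 i hi]

theorem matrix_fill_alt_get (matrix : List (List Int)) (a1 : Int) (k : Nat) :
    (matrix_fill_alt matrix a1)[k]? = (matrix[k]?).map (fun r => rowB matrix.length a1 k r) := by
  simp [matrix_fill_alt, rowB, List.getElem?_zipIdx, Option.map_map]
  rfl

-- ===== VERDICT (by name: the statement is the Claim_ definition above) =====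
theorem matrix_fill_spec : Claim_equal_matrix_fill := by
  intro matrix a1 _ _
  unfold Spec_matrix_fill
  apply List.ext_getElem?
  intro k
  rw [matrix_fill_get, matrix_fill_alt_get]
  by_cases hk : k < matrix.length
  · congr 1
    funext r
    exact row_eq matrix.length a1 k hk r
  · simp [List.getElem?_eq_none (by omega : matrix.length ≤ k)]
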